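-- pv_equiv track=rewrite | github.com/jessicayin66/newslens | backend/app/main_lite.py | get_balanced_articles
-- ===== SOURCE A (Python) =====
-- def get_balanced_articles(articles, target_balance=None):
--     """Simple balanced article selection."""
--     if not target_balance:
--         target_balance = {'left-leaning': 3, 'neutral': 4, 'right-leaning': 3}
--
--     bias_groups = {'left-leaning': [], 'neutral': [], 'right-leaning': []}
--
--     for article in articles:
--         bias_category = article.get('bias_category', 'neutral')
--         if bias_category in bias_groups:
--             bias_groups[bias_category].append(article)
--
--     balanced_articles = []
--     for category, target_count in target_balance.items():
--         available_articles = bias_groups.get(category, [])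
--         selected = available_articles[:target_count]
--         balanced_articles.extend(selected)
--
--     return balanced_articles
-- ===== SOURCE B (Python) =====
-- def get_balanced_articles(articles, target_balance=None):
--     """Balanced selection by scanning the article list once per requested category."""
--     if not target_balance:
--         target_balance = {'left-leaning': 3, 'neutral': 4, 'right-leaning': 3}
--     valid = {'left-leaning', 'neutral', 'right-leaning'}
--     balanced = []
--     for category, count in target_balance.items():
--         if category in valid:
--             balanced.extend([a for a in articles
--                              if a.get('bias_category', 'neutral') == category][:count])
--     return balanced
-- ===== Notes on version B (the rewrite author's own statement) =====
-- stated objective: simpler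
-- what changed: B drops A's grouping dict entirely: it loops over target_balance and, for each whitelisted category, filters the article list directly and truncates, instead of first indexing all articles into bias buckets and then slicing the buckets.
import Mathlib
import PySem

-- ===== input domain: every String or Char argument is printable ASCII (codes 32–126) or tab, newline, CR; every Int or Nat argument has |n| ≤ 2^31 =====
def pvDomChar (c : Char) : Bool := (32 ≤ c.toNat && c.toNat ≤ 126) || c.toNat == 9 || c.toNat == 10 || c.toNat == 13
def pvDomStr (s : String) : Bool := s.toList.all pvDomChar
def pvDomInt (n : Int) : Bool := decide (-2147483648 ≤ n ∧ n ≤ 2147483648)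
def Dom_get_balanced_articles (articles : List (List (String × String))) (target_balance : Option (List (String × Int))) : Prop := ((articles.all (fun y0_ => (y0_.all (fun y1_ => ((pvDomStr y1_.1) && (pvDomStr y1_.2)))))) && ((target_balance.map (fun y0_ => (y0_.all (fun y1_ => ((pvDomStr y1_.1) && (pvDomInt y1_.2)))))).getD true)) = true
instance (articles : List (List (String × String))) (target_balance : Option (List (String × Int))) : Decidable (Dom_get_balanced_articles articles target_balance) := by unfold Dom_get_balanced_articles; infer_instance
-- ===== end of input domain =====

-- A groups articles into a fixed three-key bias dict, then slices each requested
-- category's bucket; B (simpler) skips the grouping and filters the article list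
-- per whitelisted requested category. Proved equal on all inputs.

-- ===== PORT A =====
-- article.get('bias_category', 'neutral')
def pvBiasCat (a : List (String × String)) : String :=
  (PySem.Dict.mk a).getD "bias_category" "neutral"

def pvDefaultTB : List (String × Int) :=
  [("left-leaning", 3), ("neutral", 4), ("right-leaning", 3)]

def get_balanced_articles (articles : List (List (String × String))) (target_balance : Option (List (String × Int))) : List (List (String × String)) :=
  -- if not target_balance: target_balance = {...}
  let tb : List (String × Int) :=
    match target_balance with
    | none => pvDefaultTB
    | some l => if l = [] then pvDefaultTB else l
  -- bias_groups = {'left-leaning': [], 'neutral': [], 'right-leaning': []}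
  let groups0 : PySem.Dict String (List (List (String × String))) :=
    PySem.Dict.mk [("left-leaning", []), ("neutral", []), ("right-leaning", [])]
  -- for article in articles: if bias_category in bias_groups: append
  let bias_groups := articles.foldl (fun d article =>
    let c := pvBiasCat article
    if d.contains c then d.modify c [] (fun l => l ++ [article]) else d) groups0
  -- for category, target_count in target_balance.items(): extend(groups.get(cat, [])[:count])
  tb.foldl (fun acc p =>
    acc ++ PySem.List.slice (bias_groups.getD p.1 []) none (some p.2)) []

-- ===== PORT B =====
def get_balanced_articles_alt (articles : List (List (String × String))) (target_balance : Option (List (String × Int))) : List (List (String × String)) :=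
  let tb : List (String × Int) :=
    match target_balance with
    | none => pvDefaultTB
    | some l => if l = [] then pvDefaultTB else l
  tb.foldl (fun acc p =>
    if p.1 == "left-leaning" || p.1 == "neutral" || p.1 == "right-leaning" then
      acc ++ PySem.List.slice (articles.filter (fun a => pvBiasCat a == p.1)) none (some p.2)
    else acc) []

-- ===== PRECONDITION & SPEC =====
def Spec_get_balanced_articles (articles : List (List (String × String))) (target_balance : Option (List (String × Int))) (out : List (List (String × String))) : Prop := out = get_balanced_articles_alt articles target_balance
instance (articles : List (List (String × String))) (target_balance : Option (List (String × Int))) (out : List (List (String × String))) : Decidable (Spec_get_balanced_articles articles target_balance out) := by unfold Spec_get_balanced_articles; infer_instance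

-- ===== CLAIM (what is proved, stated in full; the proofs are below) =====
def Claim_equal_get_balanced_articles : Prop := ∀ (articles : List (List (String × String))) (target_balance : Option (List (String × Int))), Dom_get_balanced_articles articles target_balance → Spec_get_balanced_articles articles target_balance (get_balanced_articles articles target_balance)

-- ===== LEMMAS AND PROOFS =====

-- the grouping loop's step
def pvStep (d : PySem.Dict String (List (List (String × String)))) (article : List (String × String)) : PySem.Dict String (List (List (String × String))) :=
  let c := pvBiasCat article
  if d.contains c then d.modify c [] (fun l => l ++ [article]) else d

lemma pvStep_contains (d : PySem.Dict String (List (List (String × String)))) (a : List (String × String)) (cat : String) :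
    (pvStep d a).contains cat = d.contains cat := by
  unfold pvStep
  by_cases h : d.contains (pvBiasCat a)
  · simp only [h, if_true]
    rw [PySem.Dict.contains_modify]
    by_cases hc : cat = pvBiasCat a
    · subst hc; simp [h]
    · simp [hc]
  · simp [h]

lemma pvFold_getD (l : List (List (String × String))) (d : PySem.Dict String (List (List (String × String)))) (cat : String) :
    (l.foldl pvStep d).getD cat [] =
      d.getD cat [] ++ (if d.contains cat then l.filter (fun a => pvBiasCat a == cat) else []) := by
  induction l generalizing d with
  | nil => by_cases h : d.contains cat <;> simp [h]
  | cons a l ih =>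
    rw [List.foldl_cons, ih (pvStep d a), pvStep_contains]
    have hstep : (pvStep d a).getD cat [] =
        d.getD cat [] ++ (if d.contains cat ∧ pvBiasCat a = cat then [a] else []) := by
      unfold pvStep
      by_cases h : d.contains (pvBiasCat a)
      · simp only [h, if_true]
        rw [PySem.Dict.getD_modify]
        by_cases hc : cat = pvBiasCat a
        · subst hc; simp [h]
        · have hna : ¬(d.contains cat = true ∧ pvBiasCat a = cat) := fun hh => hc hh.2.symm
          simp [hc, hna]
      · simp only [h]
        by_cases hc : pvBiasCat a = cat
        · subst hc; simp [h]
        · simp [hc]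
    rw [hstep]
    by_cases h : d.contains cat
    · by_cases hc : pvBiasCat a = cat <;>
        simp [h, hc, List.append_assoc]
    · simp [h]

lemma pvSlice_nil (b : Int) : PySem.List.slice ([] : List (List (String × String))) none (some b) = [] := by
  simp [PySem.List.slice]

lemma pvContains_groups0 (cat : String) :
    (PySem.Dict.mk [("left-leaning", ([] : List (List (String × String)))), ("neutral", []), ("right-leaning", [])]).contains cat =
      (cat == "left-leaning" || cat == "neutral" || cat == "right-leaning") := by
  simp [PySem.Dict.contains_mk, List.any, BEq.comm, Bool.or_assoc]

lemma pvGetD_groups0 (cat : String) :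
    (PySem.Dict.mk [("left-leaning", ([] : List (List (String × String)))), ("neutral", []), ("right-leaning", [])]).getD cat [] = [] := by
  by_cases h1 : cat = "left-leaning"
  · subst h1; decide
  by_cases h2 : cat = "neutral"
  · subst h2; decide
  by_cases h3 : cat = "right-leaning"
  · subst h3; decide
  rw [PySem.Dict.getD_of_not_contains]
  rw [pvContains_groups0]
  simp [h1, h2, h3]

-- ===== VERDICT (by name: the statement is the Claim_ definition above) =====
theorem get_balanced_articles_spec : Claim_equal_get_balanced_articles := by
  intro articles target_balance _
  unfold Spec_get_balanced_articles get_balanced_articles get_balanced_articles_alt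
  apply List.foldl_ext
  intro acc p _
  rw [show (fun d article =>
      let c := pvBiasCat article
      if d.contains c then d.modify c [] (fun l => l ++ [article]) else d) = pvStep from rfl]
  rw [pvFold_getD, pvGetD_groups0, pvContains_groups0, List.nil_append]
  by_cases h : (p.1 == "left-leaning" || p.1 == "neutral" || p.1 == "right-leaning") = true
  · simp [h]
  · simp [h, pvSlice_nil]
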